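-- pv_equiv track=rewrite | github.com/Nau4man/dsa-visualizer-engine | dsa_visualizer/data_structures/render/binary_tree.py | _level_gaps
-- ===== SOURCE A (Python) =====
-- def _level_gaps(level_count: int) -> list[int]:
--     if level_count <= 0:
--         return []
--     gaps = [0] * level_count
--     gaps[-1] = 4
--     for index in range(level_count - 2, -1, -1):
--         gaps[index] = gaps[index + 1] * 2 + 2
--     return gaps
-- ===== SOURCE B (Python) =====
-- def _level_gaps(level_count: int) -> list[int]:
--     return [6 * (1 << (level_count - 1 - i)) - 2 for i in range(level_count)]
-- ===== Notes on version B (the rewrite author's own statement) =====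
-- stated objective: simpler
-- what changed: Replaced the backward recurrence gaps[i] = 2*gaps[i+1] + 2 (seeded with gaps[-1] = 4 and filled by a reversed index loop over a preallocated list) with a one-line comprehension using the closed form 6 * 2^(level_count-1-i) - 2 per index, so no element depends on any other and no guard or preallocation is needed.
import Mathlib
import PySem

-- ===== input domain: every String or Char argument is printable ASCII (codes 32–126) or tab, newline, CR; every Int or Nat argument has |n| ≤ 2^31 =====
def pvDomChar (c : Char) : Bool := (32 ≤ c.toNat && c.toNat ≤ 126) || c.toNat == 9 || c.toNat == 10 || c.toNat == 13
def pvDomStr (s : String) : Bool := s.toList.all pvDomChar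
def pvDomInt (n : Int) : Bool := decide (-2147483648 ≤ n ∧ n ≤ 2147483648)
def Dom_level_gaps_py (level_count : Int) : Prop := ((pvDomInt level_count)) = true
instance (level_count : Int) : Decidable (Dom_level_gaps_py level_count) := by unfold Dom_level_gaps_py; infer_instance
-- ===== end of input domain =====

-- B replaces A's backward recurrence (gaps[i] = 2*gaps[i+1] + 2, seeded with gaps[-1] = 4)
-- by a per-index closed form 6 * 2^(level_count-1-i) - 2 in a single comprehension (simpler).

-- ===== PORT A =====
def level_gaps_py (level_count : Int) : List Int :=
  if level_count ≤ 0 then []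
  else
    let gaps := List.replicate level_count.toNat (0 : Int)
    let gaps := PySem.List.pySetD gaps (-1) 4          -- gaps[-1] = 4 (in range: length ≥ 1)
    (PySem.List.pyRange (level_count - 2) (-1) (-1)).foldl
      (fun gaps index =>
        PySem.List.pySetD gaps index (PySem.List.pyGetD gaps (index + 1) 0 * 2 + 2)) gaps

-- ===== PORT B =====
def level_gaps_py_alt (level_count : Int) : List Int :=
  (PySem.List.pyRange 0 level_count 1).map (fun i => 6 * 2 ^ (level_count - 1 - i).toNat - 2)

-- ===== PRECONDITION & SPEC =====
def Spec_level_gaps_py (level_count : Int) (out : List Int) : Prop := out = level_gaps_py_alt level_count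
instance (level_count : Int) (out : List Int) : Decidable (Spec_level_gaps_py level_count out) := by unfold Spec_level_gaps_py; infer_instance

-- ===== CLAIM (what is proved, stated in full; the proofs are below) =====
def Claim_equal_level_gaps_py : Prop := ∀ (level_count : Int), Dom_level_gaps_py level_count → Spec_level_gaps_py level_count (level_gaps_py level_count)

-- ===== LEMMAS AND PROOFS =====

theorem level_gaps_alt_length (n : Int) : (level_gaps_py_alt n).length = n.toNat := by
  simp [level_gaps_py_alt, PySem.List.length_pyRange_one]

theorem level_gaps_alt_getElem (n : Int) (j : Nat) (hj : j < (level_gaps_py_alt n).length) :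
    (level_gaps_py_alt n)[j] = 6 * 2 ^ (n - 1 - (j : Int)).toNat - 2 := by
  unfold level_gaps_py_alt
  simp only [List.getElem_map]
  rw [PySem.List.getElem_pyRange_one]
  simp

-- Loop invariant for A's backward fill: if all entries at indices ≥ m already hold the
-- closed form, folding the countdown range (m-1, …, 0) completes the closed-form list.
theorem level_gaps_loop_inv (n : Int) (hn : 1 ≤ n) :
    ∀ (m : Nat) (gaps : List Int),
      gaps.length = n.toNat → m ≤ n.toNat - 1 →
      (∀ (j : Nat) (hj : j < gaps.length), m ≤ j →
        gaps[j] = 6 * 2 ^ (n - 1 - (j : Int)).toNat - 2) →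
      (PySem.List.pyRange ((m : Int) - 1) (-1) (-1)).foldl
        (fun gaps index =>
          PySem.List.pySetD gaps index (PySem.List.pyGetD gaps (index + 1) 0 * 2 + 2)) gaps
        = level_gaps_py_alt n := by
  intro m
  induction m with
  | zero =>
    intro gaps hlen _ hinv
    rw [PySem.List.pyRange_neg_one_eq_nil (by norm_num)]
    simp only [List.foldl_nil]
    apply List.ext_getElem
    · rw [hlen, level_gaps_alt_length]
    · intro j h1 h2
      rw [hinv j h1 (Nat.zero_le j), level_gaps_alt_getElem]
  | succ m ih =>
    intro gaps hlen hm hinv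
    have hcast : ((m + 1 : Nat) : Int) - 1 = (m : Int) := by push_cast; ring
    rw [hcast, PySem.List.pyRange_neg_one_cons (by omega : (-1 : Int) < (m : Int))]
    simp only [List.foldl_cons]
    have hm1lt : m + 1 < gaps.length := by omega
    have hread : PySem.List.pyGetD gaps ((m : Int) + 1) 0
        = 6 * 2 ^ (n - 1 - ((m : Int) + 1)).toNat - 2 := by
      have : ((m : Int) + 1) = ((m + 1 : Nat) : Int) := by push_cast; ring
      rw [this, PySem.List.pyGetD_natCast, List.getD_eq_getElem _ _ hm1lt,
        hinv (m + 1) hm1lt (by omega)]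
    have hwrite : PySem.List.pySetD gaps (m : Int)
        (PySem.List.pyGetD gaps ((m : Int) + 1) 0 * 2 + 2)
        = gaps.set m (6 * 2 ^ (n - 1 - (m : Int)).toNat - 2) := by
      rw [hread, PySem.List.pySetD_natCast]
      congr 1
      have e1 : n - 1 - ((m : Int) + 1) = n - 2 - (m : Int) := by ring
      have e2 : (n - 1 - (m : Int)).toNat = (n - 2 - (m : Int)).toNat + 1 := by omega
      rw [e1, e2, pow_succ]; ring
    rw [hwrite]
    have h1 : (m : Int) - 1 = ((m : Nat) : Int) - 1 := by norm_num
    rw [ih (gaps.set m (6 * 2 ^ (n - 1 - (m : Int)).toNat - 2))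
      (by simpa using hlen) (by omega) ?_]
    intro j hj hmj
    by_cases hjm : j = m
    · subst hjm; simp
    · rw [List.getElem_set_ne (by omega)]
      exact hinv j (by simpa using hj) (by omega)

theorem level_gaps_py_spec : Claim_equal_level_gaps_py := by
  intro n _
  unfold Spec_level_gaps_py level_gaps_py
  by_cases h : n ≤ 0
  · rw [if_pos h]
    unfold level_gaps_py_alt
    rw [PySem.List.pyRange_one_eq_nil h, List.map_nil]
  · rw [if_neg h]
    have hn : 1 ≤ n := by omega
    have hL : 1 ≤ n.toNat := by omega
    have hinit : PySem.List.pySetD (List.replicate n.toNat (0 : Int)) (-1) 4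
        = (List.replicate n.toNat (0 : Int)).set (n.toNat - 1) 4 := by
      simp [PySem.List.pySetD, PySem.List.pySet?, PySem.List.pyIdx?]
      split_ifs with h1
      · simp
      · exfalso; omega
    simp only [hinit]
    have hrange : n - 2 = ((n.toNat - 1 : Nat) : Int) - 1 := by omega
    rw [hrange]
    apply level_gaps_loop_inv n hn (n.toNat - 1)
    · simp
    · omega
    · intro j hj hmj
      simp only [List.length_set, List.length_replicate] at hj
      have hjm : j = n.toNat - 1 := by omega
      subst hjm
      rw [List.getElem_set_self]
      have : (n - 1 - ((n.toNat - 1 : Nat) : Int)).toNat = 0 := by omega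
      rw [this]; norm_num
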